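-- pv_equiv track=rewrite | github.com/JundMaster/projeto_final_fp | functions.py | get_gm_list
-- ===== SOURCE A (Python) =====
-- def get_gm_list(game_mode):
--     temp_list = []
--     number = []
--     mode_list = []
--     return_list = []
--     minor = 0
--     major = 2
--     num = 0
--     list_len = len(game_mode[0])
--
--     for j in range (0, len(game_mode)):
--         for i in range (0, len(game_mode[j])):
--             if game_mode[j][i].isdigit():
--                 number.append(str(game_mode[j][i]))
--
--             elif number:
--                 temp_list.append(number)
--                 number = []
--
--             if i == len(game_mode[j]) - 1:
--                 temp_list.append(number)
--                 number = []
--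
--     for i in range(0, len(temp_list)):
--         try:
--             mode_list.append(int("".join(temp_list[i])))
--         except:
--             continue
--
--
--     while num != len(mode_list)//2:
--         for i in range (minor, major):
--             number.append(mode_list[i])
--
--         return_list.append(number)
--         number = []
--         num += 1
--         minor += 2
--         major += 2
--     return return_list
-- ===== SOURCE B (Python) =====
-- def get_gm_list(game_mode):
--     nums = [int(tok)
--             for s in game_mode
--             for tok in "".join(c if c.isdigit() else " " for c in s).split()]
--     it = iter(nums)
--     return [[a, b] for a, b in zip(it, it)]
-- ===== Notes on version B (the rewrite author's own statement) =====
-- stated objective: faster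
-- what changed: B has no character-level run state machine and no counter loops: it masks every non-digit character to a space and lets str.split() produce the digit runs per string, converts them in a single comprehension, and pairs consecutive numbers by zipping one iterator with itself, replacing A's index-driven double scan with an accumulator, the join+try/except pass, and the minor/major while-loop. (the masking/join/split and zip run in C instead of per-character Python bytecode)
import Mathlib
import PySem

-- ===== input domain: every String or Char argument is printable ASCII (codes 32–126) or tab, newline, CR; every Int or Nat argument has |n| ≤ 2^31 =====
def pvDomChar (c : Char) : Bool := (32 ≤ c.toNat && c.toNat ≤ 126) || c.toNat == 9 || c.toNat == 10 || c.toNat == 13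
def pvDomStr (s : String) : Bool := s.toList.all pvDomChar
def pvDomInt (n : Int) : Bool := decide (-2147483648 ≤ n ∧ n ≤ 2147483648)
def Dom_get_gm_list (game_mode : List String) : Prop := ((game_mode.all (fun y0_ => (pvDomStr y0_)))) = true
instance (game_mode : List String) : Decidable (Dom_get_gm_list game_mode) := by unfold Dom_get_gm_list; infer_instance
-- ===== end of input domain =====

-- B drops A's character-level run state machine and counter loops: it masks non-digits to spaces and lets
-- str.split() yield the digit runs, then pairs consecutive numbers by zipping one iterator with itself.

-- ===== PORT A =====
-- Python's `number` is a list of 1-char strings later "".join-ed; it is modelled as a List Char (exact: str(c) of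
-- a character is that character, and joining 1-char strings concatenates the characters).
-- The while loop `while num != len(mode_list)//2` increments num from 0 by 1, so it runs exactly
-- (len(mode_list)//2) times; it is transliterated as a recursion on that remaining-iteration count,
-- carrying Python's `minor`/`major` counters.
def pairLoopA (ms : List Int) : Nat → Int → Int → List (List Int) → List (List Int)
  | 0, _, _, ret => ret
  | k + 1, minor, major, ret =>
      let number := (PySem.List.pyRange minor major 1).foldl
        (fun (acc : List Int) i => acc ++ [PySem.List.pyGetD ms i 0]) []
      pairLoopA ms k (minor + 2) (major + 2) (ret ++ [number])

-- the body of A's inner `for i in range(0, len(game_mode[j]))` loop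
def scanStepA (s : List Char) (st2 : List (List Char) × List Char) (i : Int) :
    List (List Char) × List Char :=
  let c := PySem.List.pyGetD s i ' '
  let st3 :=
    if PySem.Chars.isdigit c then (st2.1, st2.2 ++ [c])
    else if st2.2 ≠ [] then (st2.1 ++ [st2.2], ([] : List Char))
    else st2
  if i = (s.length : Int) - 1 then (st3.1 ++ [st3.2], ([] : List Char)) else st3

-- the body of A's outer `for j in range(0, len(game_mode))` loop
def outerStepA (st : List (List Char) × List Char) (str : String) :
    List (List Char) × List Char :=
  (PySem.List.pyRange 0 ((str.toList.length : Int)) 1).foldl (scanStepA str.toList) st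

-- the body of A's `mode_list.append(int("".join(temp_list[i])))` / `except: continue` loop
def flushStepA (acc : List Int) (t : List Char) : List Int :=
  match PySem.Int.ofChars? t with
  | some n => acc ++ [n]
  | none => acc

def get_gm_list (game_mode : List String) : List (List Int) :=
  -- `list_len = len(game_mode[0])` raises IndexError on []: excluded by Pre_get_gm_list (list_len is never read).
  let scanned := (PySem.List.pyRange 0 (game_mode.length : Int) 1).foldl
    (fun (st : List (List Char) × List Char) j =>
      outerStepA st (PySem.List.pyGetD game_mode j "")) (([], []) : List (List Char) × List Char)
  let mode_list := scanned.1.foldl flushStepA []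
  pairLoopA mode_list (PySem.Int.floordiv (mode_list.length : Int) 2).toNat 0 2 []

-- ===== PORT B =====
-- `"".join(c if c.isdigit() else " " for c in s)`: joining 1-char strings with "" is the List.map on characters
def maskB (s : List Char) : List Char :=
  s.map (fun c => if PySem.Chars.isdigit c then c else ' ')

-- `zip(it, it)` on one iterator consumes two elements per tuple and stops when fewer than two remain
def pairUpB : List Int → List (List Int)
  | a :: b :: r => [a, b] :: pairUpB r
  | _ => []

def get_gm_list_alt (game_mode : List String) : List (List Int) :=
  -- `int(tok)`: every token of the split is a nonempty digit run, so ofChars? is some there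
  -- (the none/ValueError branch is unreachable); .toList is that single value
  let nums := game_mode.flatMap (fun s =>
    (PySem.Chars.split₀ (maskB s.toList)).flatMap
      (fun t => (PySem.Int.ofChars? t).toList))
  pairUpB nums

-- ===== PRECONDITION & SPEC =====
-- A evaluates len(game_mode[0]) first, so it raises IndexError on the empty list; only that input is excluded.
def Pre_get_gm_list (game_mode : List String) : Prop := game_mode ≠ []
instance (game_mode : List String) : Decidable (Pre_get_gm_list game_mode) := by
  unfold Pre_get_gm_list; infer_instance

def pvWitness_get_gm_list : List String := ["1a22 333", "4"]

def Spec_get_gm_list (game_mode : List String) (out : List (List Int)) : Prop :=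
  out = get_gm_list_alt game_mode
instance (game_mode : List String) (out : List (List Int)) : Decidable (Spec_get_gm_list game_mode out) := by
  unfold Spec_get_gm_list; infer_instance

-- ===== CLAIM (what is proved, stated in full; the proofs are below) =====
def Claim_equal_get_gm_list : Prop := ∀ (game_mode : List String), Dom_get_gm_list game_mode →
  Pre_get_gm_list game_mode → Spec_get_gm_list game_mode (get_gm_list game_mode)

-- ===== LEMMAS AND PROOFS =====

-- The digit-run state machine both proofs reduce to: pvParts cs cur = (finished runs, pending run).
def pvParts : List Char → List Char → (List (List Char) × List Char)
  | [], cur => ([], cur)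
  | c :: r, cur =>
    if PySem.Chars.isdigit c then pvParts r (cur ++ [c])
    else if cur ≠ [] then
      let p := pvParts r []
      (cur :: p.1, p.2)
    else pvParts r []

def pvG (t : List Char) : List Int := (PySem.Int.ofChars? t).toList

-- the ints a whole character stream contributes (finished runs plus final flush of the pending run)
def pvOut (cs : List Char) : List Int := (((pvParts cs []).1) ++ [(pvParts cs []).2]).flatMap pvG

-- the runs str.split() sees: finished runs, plus the pending run only when nonempty
def pvRuns (cs : List Char) (cur : List Char) : List (List Char) :=
  (pvParts cs cur).1 ++ (if (pvParts cs cur).2 = [] then [] else [(pvParts cs cur).2])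

theorem pvParts_append (xs ys : List Char) (cur : List Char) :
    pvParts (xs ++ ys) cur =
      ((pvParts xs cur).1 ++ (pvParts ys (pvParts xs cur).2).1,
       (pvParts ys (pvParts xs cur).2).2) := by
  induction xs generalizing cur with
  | nil => simp [pvParts]
  | cons c r ih =>
    simp only [List.cons_append, pvParts]
    split_ifs with h1 h2 <;> simp [ih]

-- A's inner character fold (without the end-of-string flush) is the pvParts machine
theorem foldA_eq_pvParts (s : List Char) (tl : List (List Char)) (cur : List Char) :
    s.foldl (fun (st2 : List (List Char) × List Char) c =>
        if PySem.Chars.isdigit c then (st2.1, st2.2 ++ [c])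
        else if st2.2 ≠ [] then (st2.1 ++ [st2.2], ([] : List Char))
        else st2) (tl, cur)
      = (tl ++ (pvParts s cur).1, (pvParts s cur).2) := by
  induction s generalizing tl cur with
  | nil => simp [pvParts]
  | cons c r ih =>
    simp only [ne_eq, ite_not] at ih ⊢
    simp only [List.foldl_cons, pvParts, ne_eq, ite_not]
    split_ifs with h1 h2
    · exact ih _ _
    · subst h2; exact ih _ _
    · rw [ih]; simp

-- a digit ('0'..'9') is not Python whitespace
theorem isspace_of_isdigit (c : Char) (h : PySem.Chars.isdigit c = true) :
    PySem.Chars.isspace c = false := by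
  simp only [PySem.Chars.isdigit, Bool.and_eq_true, decide_eq_true_eq] at h
  obtain ⟨h1, h2⟩ := h
  have hn1 : 48 ≤ c.toNat := h1
  have hn2 : c.toNat ≤ 57 := h2
  simp only [PySem.Chars.isspace]
  simp only [Bool.or_eq_false_iff, Bool.and_eq_false_iff, decide_eq_false_iff_not]
  omega

-- str.split() on the masked stream produces exactly the digit runs of the original stream
theorem go_mask (cs : List Char) (cur : List Char) (acc : List (List Char)) :
    PySem.Chars.split₀.go (maskB cs) cur acc = acc.reverse ++ pvRuns cs cur.reverse := by
  induction cs generalizing cur acc with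
  | nil =>
    simp only [maskB, List.map_nil, PySem.Chars.split₀.go, pvRuns, pvParts]
    by_cases h : cur = []
    · subst h; simp
    · rw [if_neg (by simpa using h)]
      simp [h]
  | cons c r ih =>
    simp only [maskB, List.map_cons] at ih ⊢
    by_cases hd : PySem.Chars.isdigit c
    · rw [if_pos hd, PySem.Chars.split₀.go, if_neg (by simp [isspace_of_isdigit c hd]),
        ih (c :: cur) acc]
      simp [pvRuns, pvParts, hd]
    · rw [if_neg hd, PySem.Chars.split₀.go, if_pos (by decide)]
      by_cases h : cur = []
      · subst h
        rw [if_pos (by decide), ih [] acc]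
        simp [pvRuns, pvParts, hd]
      · rw [if_neg (by simpa using h), ih [] (cur.reverse :: acc)]
        simp [pvRuns, pvParts, hd, h]

theorem split₀_mask (cs : List Char) :
    PySem.Chars.split₀ (maskB cs) = pvRuns cs [] := by
  have := go_mask cs [] []
  simpa [PySem.Chars.split₀] using this

theorem pvG_nil : pvG [] = [] := rfl

theorem runs_flatMap (cs : List Char) : (pvRuns cs []).flatMap pvG = pvOut cs := by
  unfold pvRuns pvOut
  by_cases h : (pvParts cs []).2 = [] <;>
    simp [h, List.flatMap_append, pvG_nil]

-- A's pairing while-loop, closed form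
theorem pairLoopA_eq (ms : List Int) (k : Nat) (a : Int) (ret : List (List Int)) :
    pairLoopA ms k a (a + 2) ret =
      ret ++ (List.range k).map
        (fun j : Nat => [PySem.List.pyGetD ms (a + 2 * (j : Int)) 0,
          PySem.List.pyGetD ms (a + 2 * (j : Int) + 1) 0]) := by
  induction k generalizing a ret with
  | zero => simp [pairLoopA]
  | succ k ih =>
    have hr2 : PySem.List.pyRange a (a + 2) 1 = [a, a + 1] := by
      rw [PySem.List.pyRange_one_cons (by omega), PySem.List.pyRange_one_cons (by omega),
        PySem.List.pyRange_one_eq_nil (by omega)]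
    show pairLoopA ms k (a + 2) (a + 2 + 2) _ = _
    rw [hr2]
    have := ih (a + 2)
      (ret ++ [[PySem.List.pyGetD ms a 0, PySem.List.pyGetD ms (a + 1) 0]])
    simp only [List.foldl_cons, List.foldl_nil, List.nil_append, List.singleton_append]
    rw [this, List.range_succ_eq_map, List.map_cons, List.map_map, List.append_assoc,
      List.singleton_append]
    congr 1
    congr 1
    · norm_num
    · apply List.map_congr_left
      intro j _
      simp only [Function.comp_apply]
      push_cast
      ring_nf

-- B's zip(it, it) pairing, as the same range map
theorem pairUpB_eq (ns : List Int) :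
    pairUpB ns = (List.range (ns.length / 2)).map
      (fun j : Nat => [ns.getD (2 * j) 0, ns.getD (2 * j + 1) 0]) := by
  induction ns using pairUpB.induct with
  | case1 a b r ih =>
    show [a, b] :: pairUpB r = _
    rw [ih]
    have hl : (a :: b :: r).length / 2 = r.length / 2 + 1 := by simp; omega
    rw [hl, List.range_succ_eq_map, List.map_cons, List.map_map]
    refine congrArg₂ List.cons rfl ?_
    apply List.map_congr_left
    intro j _
    simp only [Function.comp_apply]
    have e1 : 2 * (j + 1) = 2 * j + 1 + 1 := by ring
    rw [e1]
    simp
  | case2 t h1 =>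
    match t, h1 with
    | [], _ => simp [pairUpB]
    | [a], _ => simp [pairUpB]
    | a :: b :: r, h1 => exact absurd rfl (h1 a b r)

-- prefix form of the pyRange/pyGetD fold bridge (the loop stops before the last index)
theorem foldl_pyRange_take {α β : Type} (cs : List α) (d : α) (f : β → α → β) (init : β)
    (m : Nat) (hm : m ≤ cs.length) :
    (PySem.List.pyRange 0 (m : Int) 1).foldl
      (fun acc i => f acc (PySem.List.pyGetD cs i d)) init
      = (cs.take m).foldl f init := by
  induction m with
  | zero => simp [PySem.List.pyRange_one_eq_nil]
  | succ m ih =>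
    have hm' : m ≤ cs.length := Nat.le_of_succ_le hm
    have h1 : ((m + 1 : Nat) : Int) = (m : Int) + 1 := by push_cast; ring
    rw [h1, PySem.List.pyRange_one_succ_right (by positivity),
      List.take_succ_eq_append_getElem (by omega), List.foldl_append, List.foldl_append,
      ih hm']
    simp [PySem.List.pyGetD_natCast,
      List.getElem?_eq_getElem (show m < cs.length by omega)]

-- what one string contributes to temp_list (A flushes the pending run only when the string is nonempty)
def pvContrib (s : List Char) : List (List Char) :=
  if s = [] then [] else (pvParts s []).1 ++ [(pvParts s []).2]

theorem pvContrib_flatMap (cs : List Char) : (pvContrib cs).flatMap pvG = pvOut cs := by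
  unfold pvContrib pvOut
  split_ifs with h
  · subst h; simp [pvParts, pvG_nil]
  · rfl

-- A's inner loop over one string, with its end-of-string flush
theorem innerA_eq (cs : List Char) (tl : List (List Char)) :
    (PySem.List.pyRange 0 ((cs.length : Int)) 1).foldl
      (fun (st2 : List (List Char) × List Char) i =>
        let c := PySem.List.pyGetD cs i ' '
        let st3 :=
          if PySem.Chars.isdigit c then (st2.1, st2.2 ++ [c])
          else if st2.2 ≠ [] then (st2.1 ++ [st2.2], ([] : List Char))
          else st2
        if i = (cs.length : Int) - 1 then (st3.1 ++ [st3.2], ([] : List Char)) else st3)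
      (tl, [])
      = (tl ++ pvContrib cs, []) := by
  rcases Nat.eq_zero_or_pos cs.length with h0 | hpos
  · have : cs = [] := List.length_eq_zero_iff.mp h0
    subst this
    simp [PySem.List.pyRange_one_eq_nil, pvContrib]
  · have hsplit : ((cs.length : Nat) : Int) = ((cs.length - 1 : Nat) : Int) + 1 := by omega
    rw [hsplit, PySem.List.pyRange_one_succ_right (by positivity), List.foldl_append]
    simp only [add_sub_cancel_right]
    rw [PySem.List.foldl_congr_mem
      (PySem.List.pyRange 0 ((cs.length - 1 : Nat) : Int) 1) _
      (fun (st2 : List (List Char) × List Char) i =>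
        let c := PySem.List.pyGetD cs i ' '
        if PySem.Chars.isdigit c then (st2.1, st2.2 ++ [c])
        else if st2.2 ≠ [] then (st2.1 ++ [st2.2], ([] : List Char))
        else st2) _
      (by
        intro acc i hi
        rw [PySem.List.mem_pyRange_one] at hi
        have hne : ¬ (i = ((cs.length - 1 : Nat) : Int)) := by omega
        simp only [if_neg hne])]
    rw [foldl_pyRange_take cs ' '
      (fun (st2 : List (List Char) × List Char) c =>
        if PySem.Chars.isdigit c then (st2.1, st2.2 ++ [c])
        else if st2.2 ≠ [] then (st2.1 ++ [st2.2], ([] : List Char))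
        else st2) _ _ (by omega)]
    rw [foldA_eq_pvParts]
    simp only [List.foldl_cons, List.foldl_nil, if_true]
    have hget : PySem.List.pyGetD cs ((cs.length - 1 : Nat) : Int) ' '
        = cs.getD (cs.length - 1) ' ' := PySem.List.pyGetD_natCast cs _ ' '
    have hfull : cs.take (cs.length - 1) ++ [cs.getD (cs.length - 1) ' '] = cs := by
      rw [List.getD_eq_getElem cs ' ' (show cs.length - 1 < cs.length by omega),
        List.take_append_getElem (by omega),
        show cs.length - 1 + 1 = cs.length by omega, List.take_length]
    have hne : cs ≠ [] := by
      intro hc; rw [hc] at hpos; simp at hpos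
    have hparts : pvParts cs [] =
        ((pvParts (cs.take (cs.length - 1)) []).1 ++
          (pvParts [cs.getD (cs.length - 1) ' '] (pvParts (cs.take (cs.length - 1)) []).2).1,
         (pvParts [cs.getD (cs.length - 1) ' '] (pvParts (cs.take (cs.length - 1)) []).2).2) := by
      conv_lhs => rw [← hfull]
      rw [pvParts_append]
    rw [hget]
    simp only [List.getD] at hparts ⊢
    by_cases hd : PySem.Chars.isdigit (cs[cs.length - 1]?.getD ' ')
    · simp [pvContrib, hne, hparts, pvParts, hd]
    · by_cases hp : (pvParts (cs.take (cs.length - 1)) []).2 = []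
      · simp [pvContrib, hne, hparts, pvParts, hd, hp]
      · simp [pvContrib, hne, hparts, pvParts, hd, hp]

-- A's whole scanning loop over the list of strings
theorem stringsA (gm : List String) (tl : List (List Char)) :
    gm.foldl outerStepA (tl, [])
      = (tl ++ gm.flatMap (fun s => pvContrib s.toList), []) := by
  induction gm generalizing tl with
  | nil => simp
  | cons s rest ih =>
    simp only [List.foldl_cons]
    show rest.foldl outerStepA
      ((PySem.List.pyRange 0 ((s.toList.length : Int)) 1).foldl (scanStepA s.toList) (tl, [])) = _
    rw [show (scanStepA s.toList) = (fun (st2 : List (List Char) × List Char) i =>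
        let c := PySem.List.pyGetD s.toList i ' '
        let st3 :=
          if PySem.Chars.isdigit c then (st2.1, st2.2 ++ [c])
          else if st2.2 ≠ [] then (st2.1 ++ [st2.2], ([] : List Char))
          else st2
        if i = (s.toList.length : Int) - 1 then (st3.1 ++ [st3.2], ([] : List Char)) else st3)
      from rfl, innerA_eq, ih]
    simp

-- A's try/except int-conversion loop
theorem flushFold (ts : List (List Char)) (acc : List Int) :
    ts.foldl flushStepA acc = acc ++ ts.flatMap pvG := by
  rw [PySem.List.foldl_congr_mem ts _ (fun acc t => acc ++ pvG t) acc
    (by intro acc t _; show flushStepA acc t = _;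
        unfold flushStepA; cases h : PySem.Int.ofChars? t <;> simp [pvG, h])]
  exact PySem.List.foldl_append_eq_flatMap pvG ts acc

-- A's while-loop pairing equals B's iterator-zip pairing
theorem pairs_eq (ns : List Int) :
    pairLoopA ns (PySem.Int.floordiv (ns.length : Int) 2).toNat 0 2 [] = pairUpB ns := by
  have hfl : (PySem.Int.floordiv (ns.length : Int) 2).toNat = ns.length / 2 := by
    have := PySem.Int.floordiv_natCast ns.length 2
    rw [show (((2:Nat)):Int) = (2:Int) from rfl] at this
    rw [this]; omega
  have hA := pairLoopA_eq ns (ns.length / 2) 0 []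
  norm_num at hA
  rw [hfl, hA, pairUpB_eq]
  apply List.map_congr_left
  intro j hj
  rw [List.mem_range] at hj
  have h1 : 2*j < ns.length := by omega
  have h2 : 2*j + 1 < ns.length := by omega
  have e1 : (2:Int) * (j:Int) = ((2*j : Nat) : Int) := by push_cast; ring
  have e2 : ((2*j : Nat) : Int) + 1 = ((2*j + 1 : Nat) : Int) := by push_cast; ring
  rw [e1, e2, PySem.List.pyGetD_natCast, PySem.List.pyGetD_natCast]

theorem get_gm_list_eq (game_mode : List String) :
    get_gm_list game_mode = get_gm_list_alt game_mode := by
  simp only [get_gm_list, get_gm_list_alt]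
  rw [PySem.List.foldl_pyRange_zero_pyGetD' game_mode "" outerStepA ([], []),
    stringsA game_mode [], flushFold]
  have hB : ∀ s : String,
      (PySem.Chars.split₀ (maskB s.toList)).flatMap (fun t => (PySem.Int.ofChars? t).toList)
        = pvOut s.toList := fun s => by
    rw [split₀_mask]; exact runs_flatMap s.toList
  simp only [hB, List.nil_append]
  have hA : (game_mode.flatMap (fun s => pvContrib s.toList)).flatMap pvG
      = game_mode.flatMap (fun s => pvOut s.toList) := by
    rw [List.flatMap_assoc]
    simp [pvContrib_flatMap]
  rw [hA]
  exact pairs_eq _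

-- ===== VERDICT (by name: the statement is the Claim_ definition above) =====
theorem get_gm_list_spec : Claim_equal_get_gm_list := by
  intro gm _ hpre
  unfold Spec_get_gm_list
  exact get_gm_list_eq gm
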